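-- pv_equiv track=rewrite | github.com/rosacry/ssbu-mod-manager | src/core/content_importer.py | _config_payload_has_any_entries
-- ===== SOURCE A (Python) =====
-- def _config_payload_has_any_entries(payload: dict | None) -> bool:
--     if not isinstance(payload, dict):
--         return False
--     for key in (
--         "new-dir-files",
--         "new_dir_files",
--         "share-to-vanilla",
--         "share_to_vanilla",
--         "share-to-added",
--         "share_to_added",
--     ):
--         section = payload.get(key)
--         if isinstance(section, dict) and any(section.values()):
--             return True
--     other_keys = [
--         key for key in payload
--         if key not in {
--             "new-dir-files",
--             "new_dir_files",
--             "share-to-vanilla",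
--             "share_to_vanilla",
--             "share-to-added",
--             "share_to_added",
--         }
--     ]
--     return bool(other_keys)
-- ===== SOURCE B (Python) =====
-- _KNOWN_CONFIG_KEYS = {
--     "new-dir-files",
--     "new_dir_files",
--     "share-to-vanilla",
--     "share_to_vanilla",
--     "share-to-added",
--     "share_to_added",
-- }
--
--
-- def _config_payload_has_any_entries(payload: dict | None) -> bool:
--     if not isinstance(payload, dict):
--         return False
--     for key, value in payload.items():
--         if key not in _KNOWN_CONFIG_KEYS:
--             return True
--         if isinstance(value, dict) and any(value.values()):
--             return True
--     return False
-- ===== Notes on version B (the rewrite author's own statement) =====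
-- stated objective: simpler
-- what changed: Replaced A's two traversals (six fixed-key .get lookups followed by a comprehension collecting the remaining keys) with a single pass over payload.items() that classifies each entry (unknown key, or known key with a non-empty section) and returns early.
import Mathlib
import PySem

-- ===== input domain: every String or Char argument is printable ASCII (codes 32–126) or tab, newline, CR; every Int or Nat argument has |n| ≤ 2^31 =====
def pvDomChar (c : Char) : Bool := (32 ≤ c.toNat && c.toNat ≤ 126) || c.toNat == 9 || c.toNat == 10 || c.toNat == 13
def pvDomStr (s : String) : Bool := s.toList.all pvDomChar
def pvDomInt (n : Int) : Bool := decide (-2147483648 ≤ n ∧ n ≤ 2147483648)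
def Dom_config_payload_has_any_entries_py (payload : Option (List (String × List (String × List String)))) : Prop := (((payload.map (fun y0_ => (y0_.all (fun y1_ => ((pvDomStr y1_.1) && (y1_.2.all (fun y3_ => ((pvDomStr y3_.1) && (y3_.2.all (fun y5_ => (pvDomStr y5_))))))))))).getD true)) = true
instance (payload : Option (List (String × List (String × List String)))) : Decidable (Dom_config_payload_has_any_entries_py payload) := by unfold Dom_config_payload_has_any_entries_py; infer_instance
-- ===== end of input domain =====

-- B is a single classification pass over the payload's entries instead of A's two traversals
-- (fixed-key lookups, then a comprehension over the remaining keys); objective: simpler.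

-- ===== PORT A =====
-- the fixed tuple of known keys from A
def pvKnownKeys : List String :=
  ["new-dir-files", "new_dir_files", "share-to-vanilla", "share_to_vanilla",
   "share-to-added", "share_to_added"]

-- 'any(sec.values())' : a value (list[str]) is truthy iff non-empty
def pvSectionAny (sec : List (String × List String)) : Bool :=
  (PySem.Dict.ofList sec).values.any (fun v => !v.isEmpty)

def config_payload_has_any_entries_py (payload : Option (List (String × List (String × List String)))) : Bool :=
  match payload with
  | none => false                           -- not isinstance(payload, dict)
  | some d0 =>
    let d := PySem.Dict.ofList d0
    -- first loop: the six fixed keys, early return True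
    if pvKnownKeys.any (fun key =>
        match d.get? key with
        | some sec => pvSectionAny sec
        | none => false)
    then true
    else
      -- other_keys comprehension, then bool(other_keys)
      let other_keys := d.keys.filter (fun key => !(pvKnownKeys.contains key))
      !other_keys.isEmpty

-- ===== PORT B =====
def config_payload_has_any_entries_py_alt (payload : Option (List (String × List (String × List String)))) : Bool :=
  match payload with
  | none => false
  | some d0 =>
    -- single pass over payload.items(): unknown key, or known key with a non-empty sec
    (PySem.Dict.ofList d0).items.any (fun kv =>
      if !(pvKnownKeys.contains kv.1) then true
      else pvSectionAny kv.2)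

-- ===== PRECONDITION & SPEC =====
def Spec_config_payload_has_any_entries_py (payload : Option (List (String × List (String × List String)))) (out : Bool) : Prop := out = config_payload_has_any_entries_py_alt payload
instance (payload : Option (List (String × List (String × List String)))) (out : Bool) : Decidable (Spec_config_payload_has_any_entries_py payload out) := by unfold Spec_config_payload_has_any_entries_py; infer_instance

-- ===== CLAIM (what is proved, stated in full; the proofs are below) =====
def Claim_equal_config_payload_has_any_entries_py : Prop := ∀ (payload : Option (List (String × List (String × List String)))), Dom_config_payload_has_any_entries_py payload → Spec_config_payload_has_any_entries_py payload (config_payload_has_any_entries_py payload)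

-- ===== LEMMAS AND PROOFS =====

-- core lemma: over any dict with Nodup keys, A's two passes agree with B's single pass
theorem pv_core (d : PySem.Dict String (List (String × List String)))
    (hn : d.keys.Nodup) :
    (if pvKnownKeys.any (fun key =>
        match d.get? key with
        | some sec => pvSectionAny sec
        | none => false)
     then true
     else !((d.keys.filter (fun key => !(pvKnownKeys.contains key))).isEmpty))
    = d.items.any (fun kv =>
        if !(pvKnownKeys.contains kv.1) then true
        else pvSectionAny kv.2) := by
  cases hc : pvKnownKeys.any (fun key =>
      match d.get? key with
      | some sec => pvSectionAny sec
      | none => false) with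
  | true =>
    simp only [if_pos]
    rw [List.any_eq_true] at hc
    obtain ⟨key, hkmem, hg⟩ := hc
    cases hget : d.get? key with
    | none => rw [hget] at hg; simp at hg
    | some sec =>
      rw [hget] at hg
      have hitems : (key, sec) ∈ d.items :=
        PySem.Dict.mem_items_of_get?_eq_some d hget
      symm
      rw [List.any_eq_true]
      refine ⟨(key, sec), hitems, ?_⟩
      split
      · rfl
      · simpa using hg
  | false =>
    simp only [Bool.false_eq_true, if_false]
    rw [List.any_eq_false] at hc
    rw [Bool.eq_iff_iff, Bool.not_eq_true', List.isEmpty_eq_false_iff_exists_mem,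
        List.any_eq_true]
    constructor
    · rintro ⟨key, hkf⟩
      rw [List.mem_filter] at hkf
      obtain ⟨hkk, hnk⟩ := hkf
      have : ∃ kv ∈ d.items, kv.1 = key := by
        simpa [PySem.Dict.keys, List.mem_map] using hkk
      obtain ⟨kv, hkv, hkv1⟩ := this
      refine ⟨kv, hkv, ?_⟩
      have hcf : pvKnownKeys.contains kv.1 = false := by
        rw [hkv1]; simpa using hnk
      have hni : kv.1 ∉ pvKnownKeys := by simpa using hcf
      simp [hni]
    · rintro ⟨kv, hkv, hp⟩
      by_cases hk : pvKnownKeys.contains kv.1 = true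
      · -- known key: its get? succeeds, so hc forbids a non-empty section
        exfalso
        have hget : d.get? kv.1 = some kv.2 :=
          PySem.Dict.get?_of_mem_items d hkv hn
        have hmem : kv.1 ∈ pvKnownKeys := by simpa using hk
        have := hc kv.1 hmem
        rw [hget] at this
        simp only [hk, Bool.not_true, Bool.false_eq_true, if_false] at hp
        simp [hp] at this
      · refine ⟨kv.1, ?_⟩
        rw [List.mem_filter]
        exact ⟨PySem.Dict.mem_keys_of_mem_items d hkv, by simpa using hk⟩

-- ===== VERDICT (by name: the statement is the Claim_ definition above) =====
theorem config_payload_has_any_entries_py_spec : Claim_equal_config_payload_has_any_entries_py := by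
  intro payload _hd
  unfold Spec_config_payload_has_any_entries_py
  cases payload with
  | none => rfl
  | some d0 =>
    unfold config_payload_has_any_entries_py config_payload_has_any_entries_py_alt
    exact pv_core (PySem.Dict.ofList d0) (PySem.Dict.nodup_keys_ofList d0)
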